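-- pv_equiv track=rewrite | github.com/longtermrisk/marltoolbox | marltoolbox/scripts/aggregate_and_plot_tensorboard_data.py | _keep_common_steps
-- ===== SOURCE A (Python) =====
-- def _keep_common_steps(all_steps_for_one_key):
--     common_steps = []
--     for one_step in all_steps_for_one_key[0]:
--         common = True
--         for keys in all_steps_for_one_key:
--             if one_step not in keys:
--                 if one_step not in keys:
--                     common = False
--                     break
--         if common:
--             common_steps.append(one_step)
--     return common_steps
-- ===== SOURCE B (Python) =====
-- def _keep_common_steps(all_steps_for_one_key):
--     counts = {}
--     for lst in all_steps_for_one_key: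
--         for s in set(lst):
--             counts[s] = counts.get(s, 0) + 1
--     n = len(all_steps_for_one_key)
--     return [s for s in all_steps_for_one_key[0] if counts.get(s, 0) == n]
-- ===== Notes on version B (the rewrite author's own statement) =====
-- stated objective: alternative
-- what changed: B builds a frequency map once (each list contributes at most once per distinct step) and then filters the first list by count == number of lists, instead of rescanning every list for every element of the first list.
import Mathlib
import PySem

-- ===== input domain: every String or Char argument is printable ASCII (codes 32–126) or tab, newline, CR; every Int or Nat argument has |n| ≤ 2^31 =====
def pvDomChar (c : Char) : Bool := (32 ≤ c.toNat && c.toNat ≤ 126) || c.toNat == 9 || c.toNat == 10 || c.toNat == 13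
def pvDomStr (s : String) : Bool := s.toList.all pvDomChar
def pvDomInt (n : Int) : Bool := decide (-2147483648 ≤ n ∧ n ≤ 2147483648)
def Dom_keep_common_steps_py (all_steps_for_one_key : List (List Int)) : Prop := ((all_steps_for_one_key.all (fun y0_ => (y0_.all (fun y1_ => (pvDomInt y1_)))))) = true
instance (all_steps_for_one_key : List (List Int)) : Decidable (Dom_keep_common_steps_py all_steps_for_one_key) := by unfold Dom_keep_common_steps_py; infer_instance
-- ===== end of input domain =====

-- B replaces A's per-element rescan of every list by a one-pass frequency map over distinct
-- steps, then a single filter of the first list (objective: alternative).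


-- ===== PORT A =====
-- Literal port of A: iterate the first list, for each element scan every list for membership.
def keep_common_steps_py (all_steps_for_one_key : List (List Int)) : List Int :=
  match all_steps_for_one_key with
  | [] => []   -- Python raises IndexError here; excluded by Pre_
  | first :: _ =>
    first.foldl (fun common_steps one_step =>
      if all_steps_for_one_key.all (fun keys => keys.contains one_step) then
        common_steps ++ [one_step]
      else common_steps) []

-- ===== PORT B =====
-- Literal port of B: build the counts dict in one pass (set(lst) per list), then filter xs[0].
def keep_common_steps_py_alt (all_steps_for_one_key : List (List Int)) : List Int :=
  let counts : PySem.Dict Int Int :=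
    all_steps_for_one_key.foldl (fun d lst =>
      (PySem.Set.ofList lst).foldl (fun d2 s => d2.insert s (d2.getD s 0 + 1)) d)
      PySem.Dict.empty
  let n : Int := all_steps_for_one_key.length
  match all_steps_for_one_key with
  | [] => []   -- Python raises IndexError here; excluded by Pre_
  | first :: _ => first.filter (fun s => counts.getD s 0 == n)

-- ===== PRECONDITION & SPEC =====
-- Pre_ excludes only the empty outer list, on which both Pythons raise IndexError (xs[0]).
def Pre_keep_common_steps_py (all_steps_for_one_key : List (List Int)) : Prop :=
  all_steps_for_one_key ≠ []
instance (all_steps_for_one_key : List (List Int)) : Decidable (Pre_keep_common_steps_py all_steps_for_one_key) := by unfold Pre_keep_common_steps_py; infer_instance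
def pvWitness_keep_common_steps_py : List (List Int) := [[1, 2, 2, 3], [2, 3, 4], [3, 2]]

def Spec_keep_common_steps_py (all_steps_for_one_key : List (List Int)) (out : List Int) : Prop := out = keep_common_steps_py_alt all_steps_for_one_key
instance (all_steps_for_one_key : List (List Int)) (out : List Int) : Decidable (Spec_keep_common_steps_py all_steps_for_one_key out) := by unfold Spec_keep_common_steps_py; infer_instance

-- ===== CLAIM (what is proved, stated in full; the proofs are below) =====
def Claim_equal_keep_common_steps_py : Prop := ∀ (all_steps_for_one_key : List (List Int)), Dom_keep_common_steps_py all_steps_for_one_key → Pre_keep_common_steps_py all_steps_for_one_key → Spec_keep_common_steps_py all_steps_for_one_key (keep_common_steps_py all_steps_for_one_key)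

-- ===== LEMMAS AND PROOFS =====

-- counts.getD s 0 after B's outer fold = number of lists containing s (plus the start value).
theorem counts_getD (xs : List (List Int)) (d : PySem.Dict Int Int) (v : Int) :
    (xs.foldl (fun d lst =>
        (PySem.Set.ofList lst).foldl (fun d2 s => d2.insert s (d2.getD s 0 + 1)) d) d).getD v 0
      = d.getD v 0 + ((xs.filter (fun l => decide (v ∈ l))).length : Int) := by
  induction xs generalizing d with
  | nil => simp
  | cons lst rest ih =>
    simp only [List.foldl_cons, ih, List.filter_cons]
    rw [PySem.Dict.getD_foldl_insert_add_one]
    have hc : (PySem.Set.ofList lst).count v = if v ∈ lst then 1 else 0 := by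
      by_cases h : v ∈ lst
      · simp [h]
      · simp [h, List.count_eq_zero_of_not_mem
          (fun hm => h ((PySem.Set.mem_ofList lst v).mp hm))]
    rw [hc]
    by_cases h : v ∈ lst <;> simp [h] <;> ring

theorem keep_common_steps_py_spec : Claim_equal_keep_common_steps_py := by
  intro xs _ hpre
  unfold Spec_keep_common_steps_py keep_common_steps_py keep_common_steps_py_alt
  match xs, hpre with
  | first :: rest, _ =>
    simp only []
    rw [PySem.List.foldl_append_if]
    simp only [List.nil_append, List.map_id']
    apply List.filter_congr
    intro s _
    rw [counts_getD]
    simp only [PySem.Dict.getD_empty, zero_add]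
    rw [Bool.eq_iff_iff]
    simp only [List.all_eq_true, beq_iff_eq, List.contains_iff_mem]
    constructor
    · intro h
      have hlen : ((first :: rest).filter (fun l => decide (s ∈ l))).length
          = (first :: rest).length := by
        rw [List.length_filter_eq_length_iff]
        intro l hl
        simpa using h l hl
      exact_mod_cast hlen
    · intro h l hl
      have hlen : ((first :: rest).filter (fun l => decide (s ∈ l))).length
          = (first :: rest).length := by exact_mod_cast h
      simpa using (List.length_filter_eq_length_iff).mp hlen l hl
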